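-- pv_equiv track=rewrite | github.com/Tukzon/GitHubGraphDraw | githubdraw.py | generate_word_matrix
-- ===== SOURCE A (Python) =====
-- from typing import List
--
-- LETTER_MAP = {
--     'A': ["  #   ", " # #  ", "#   # ", "##### ", "#   # ", "#   # ", "#   # "],
--     'B': ["####  ", "#   # ", "#   # ", "####  ", "#   # ", "#   # ", "####  "],
--     'C': [" ###  ", "#   # ", "#     ", "#     ", "#     ", "#   # ", " ###  "],
--     'D': ["####  ", "#   # ", "#   # ", "#   # ", "#   # ", "#   # ", "####  "],
--     'E': ["##### ", "#     ", "#     ", "####  ", "#     ", "#     ", "##### "],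
--     'F': ["##### ", "#     ", "#     ", "####  ", "#     ", "#     ", "#     "],
--     'G': [" ###  ", "#   # ", "#     ", "# ### ", "#   # ", "#   # ", " ###  "],
--     'H': ["#   # ", "#   # ", "#   # ", "##### ", "#   # ", "#   # ", "#   # "],
--     'I': ["##### ", "  #   ", "  #   ", "  #   ", "  #   ", "  #   ", "##### "],
--     'J': [" #### ", "   #  ", "   #  ", "   #  ", "   #  ", "#  #  ", " ##   "],
--     'K': ["#   # ", "#  #  ", "# #   ", "##    ", "# #   ", "#  #  ", "#   # "],
--     'L': ["#     ", "#     ", "#     ", "#     ", "#     ", "#     ", "##### "],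
--     'M': ["#   # ", "#   # ", "## ## ", "# # # ", "#   # ", "#   # ", "#   # "],
--     'N': ["#   # ", "#   # ", "##  # ", "# # # ", "#  ## ", "#   # ", "#   # "],
--     'Ñ': [" ## # ", "#  ## ", "# # # ", "# # # ", "# # # ", "#  ## ", " ## # "],
--     'O': [" ###  ", "#   # ", "#   # ", "#   # ", "#   # ", "#   # ", " ###  "],
--     'P': ["####  ", "#   # ", "#   # ", "####  ", "#     ", "#     ", "#     "],
--     'Q': [" ###  ", "#   # ", "#   # ", "#   # ", "# # # ", "#  #  ", " ## # "],
--     'R': ["####  ", "#   # ", "#   # ", "####  ", "# #   ", "#  #  ", "#   # "],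
--     'S': [" ###  ", "#   # ", "#     ", " ###  ", "    # ", "#   # ", " ###  "],
--     'T': ["##### ", "  #   ", "  #   ", "  #   ", "  #   ", "  #   ", "  #   "],
--     'U': ["#   # ", "#   # ", "#   # ", "#   # ", "#   # ", "#   # ", " ###  "],
--     'V': ["#   # ", "#   # ", "#   # ", "#   # ", "#   # ", " # #  ", "  #   "],
--     'W': ["#   # ", "#   # ", "#   # ", "# # # ", "## ## ", "#   # ", "#   # "],
--     'X': ["#   # ", "#   # ", " # #  ", "  #   ", " # #  ", "#   # ", "#   # "],
--     'Y': ["#   # ", "#   # ", " # #  ", "  #   ", "  #   ", "  #   ", "  #   "],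
--     'Z': ["##### ", "    # ", "   #  ", "  #   ", " #    ", "#     ", "##### "],
--     ' ': ["      ", "      ", "      ", "      ", "      ", "      ", "      "],
--     '1': ["  #   ", " ##   ", "  #   ", "  #   ", "  #   ", "  #   ", "##### "],
--     '2': [" ###  ", "#   # ", "    # ", "   #  ", "  #   ", " #    ", "##### "],
--     '3': [" ###  ", "#   # ", "    # ", "   #  ", "    # ", "#   # ", " ###  "],
--     '4': ["   #  ", "  ##  ", " # #  ", "#  #  ", "##### ", "   #  ", "   #  "],
--     '5': ["##### ", "#     ", "####  ", "    # ", "    # ", "    # ", "####  "],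
--     '6': [" ###  ", "#   # ", "#     ", "####  ", "#   # ", "#   # ", " ###  "],
--     '7': ["##### ", "    # ", "    # ", "    # ", "    # ", "    # ", "    # "],
--     '8': [" ###  ", "#   # ", "#   # ", " ###  ", "#   # ", "#   # ", " ###  "],
--     '9': [" ###  ", "#   # ", "#   # ", " #### ", "    # ", "    # ", " ###  "],
--     '0': [" ###  ", "#   # ", "#   # ", "#   # ", "#   # ", "#   # ", " ###  "],
--     '.': ["      ", "      ", "      ", "      ", "      ", "      ", "  ##  "],
--     ',': ["      ", "      ", "      ", "      ", "      ", "    # ", "   #  "],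
--     ':': ["      ", "  ##  ", "  ##  ", "      ", "  ##  ", "  ##  ", "      "],
--     ';': ["      ", "   #  ", "      ", "   #  ", "   #  ", "  #   ", "      "],
--     '!': ["  #   ", "  #   ", "  #   ", "  #   ", "  #   ", "      ", "  #   "],
--     '?': [" ###  ", "#   # ", "    # ", "   #  ", "  #   ", "      ", "  #   "],
--     "'": ["  #   ", "  #   ", " #    ", "      ", "      ", "      ", "      "],
--     '"': ["# #   ", "# #   ", "      ", "      ", "      ", "      ", "      "],
--     '-': ["      ", "      ", "      ", "##### ", "      ", "      ", "      "],
--     '+': ["      ", "   #  ", "   #  ", "##### ", "   #  ", "   #  ", "      "],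
--     '*': ["      ", "#   # ", "  #   ", "##### ", "  #   ", "#   # ", "      "],
--     '/': ["    # ", "   #  ", "  #   ", " #    ", "#     ", "      ", "      "],
--     '\\': ["#     ", " #    ", "  #   ", "   #  ", "    # ", "      ", "      "],
--     '=': ["      ", "##### ", "      ", "##### ", "      ", "      ", "      "],
--     '_': ["      ", "      ", "      ", "      ", "      ", "      ", "##### "],
--     '<': ["    # ", "   #  ", "  #   ", "#     ", "  #   ", "   #  ", "    # "],
--     '>': ["#     ", "  #   ", "   #  ", "    # ", "   #  ", "  #   ", "#     "],
--     '[': ["  ##  ", "  #   ", "  #   ", "  #   ", "  #   ", "  #   ", "  ##  "],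
--     ']': [" ##   ", "   #  ", "   #  ", "   #  ", "   #  ", "   #  ", " ##   "],
--     '(': ["   #  ", "  #   ", " #    ", "#     ", " #    ", "  #   ", "   #  "],
--     ')': [" #    ", "  #   ", "   #  ", "    # ", "   #  ", "  #   ", " #    "],
--     '{': ["   #  ", "  #   ", "  #   ", "#     ", "  #   ", "  #   ", "   #  "],
--     '}': ["  #   ", "   #  ", "   #  ", "    # ", "   #  ", "   #  ", "  #   "],
--     '#': ["  # # ", " #####", "  # # ", " #####", "  # # ", " #####", "  # # "],
--     '$': ["  #   ", " #####", "# #   ", " ###  ", "  # # ", "##### ", "  #   "],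
--     '%': ["#   # ", "#  #  ", "   #  ", "  #   ", " #    ", "#  #  ", "#   # "],
--     '@': [" ###  ", "#   # ", "# ### ", "# # # ", "# ### ", "#     ", " ### #"],
--     '^': ["  #   ", " # #  ", "#   # ", "      ", "      ", "      ", "      "],
--     '`': ["  #   ", "   #  ", "    # ", "      ", "      ", "      ", "      "],
--     '~': [" ##   ", "#  #  ", "      ", "      ", "      ", "      ", "      "],
--     '°': ["  ##  ", " #  # ", " #  # ", "  ##  ", "      ", "      ", "      "],
--     '£': ["  #   ", " #####", "  #   ", " #####", "  #   ", " #####", "  #   "],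
--     '¥': ["#   # ", " # #  ", "  #   ", "##### ", "  #   ", "  #   ", "  #   "],
--     '€': [" ###  ", "#     ", "##### ", "#     ", "##### ", "#     ", " ###  "],
--     '¢': ["  #   ", " #####", "#     ", "#     ", "#     ", " #####", "  #   "]
-- }
--
-- def generate_word_matrix(word: str) -> List[List[str]]:
--     """
--     Given a word, generates a 2D matrix representing the word using
--     pixel-like characters. Each letter occupies 5 columns and is separated by
--     1 blank column.
--     """
--     word = word.upper()
--     total_columns = len(word) * 6 - 1
--     rows = 7
--     final_matrix = [[" " for _ in range(total_columns)] for _ in range(rows)]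
--     current_col = 0
--
--     for i, letter in enumerate(word):
--         # Get the letter representation; if not available, use a blank placeholder.
--         letter_pixels = LETTER_MAP.get(letter, ["     "] * rows)
--         for r in range(rows):
--             for c in range(5):
--                 final_matrix[r][current_col + c] = letter_pixels[r][c]
--         current_col += 6 if i < len(word) - 1 else 5
--
--     return final_matrix
-- ===== SOURCE B (Python) =====
-- from typing import List
--
-- # Compact 5-bit-per-row font: each glyph is 7 ints; bit (4 - c) of row r is
-- # set iff column c of row r is lit. Rendering decodes bits row by row and
-- # joins the per-letter 5-column slabs with a single blank column.
-- FONT_BITS = {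
--     'A': [4, 10, 17, 31, 17, 17, 17],
--     'B': [30, 17, 17, 30, 17, 17, 30],
--     'C': [14, 17, 16, 16, 16, 17, 14],
--     'D': [30, 17, 17, 17, 17, 17, 30],
--     'E': [31, 16, 16, 30, 16, 16, 31],
--     'F': [31, 16, 16, 30, 16, 16, 16],
--     'G': [14, 17, 16, 23, 17, 17, 14],
--     'H': [17, 17, 17, 31, 17, 17, 17],
--     'I': [31, 4, 4, 4, 4, 4, 31],
--     'J': [15, 2, 2, 2, 2, 18, 12],
--     'K': [17, 18, 20, 24, 20, 18, 17],
--     'L': [16, 16, 16, 16, 16, 16, 31],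
--     'M': [17, 17, 27, 21, 17, 17, 17],
--     'N': [17, 17, 25, 21, 19, 17, 17],
--     'Ñ': [13, 19, 21, 21, 21, 19, 13],
--     'O': [14, 17, 17, 17, 17, 17, 14],
--     'P': [30, 17, 17, 30, 16, 16, 16],
--     'Q': [14, 17, 17, 17, 21, 18, 13],
--     'R': [30, 17, 17, 30, 20, 18, 17],
--     'S': [14, 17, 16, 14, 1, 17, 14],
--     'T': [31, 4, 4, 4, 4, 4, 4],
--     'U': [17, 17, 17, 17, 17, 17, 14],
--     'V': [17, 17, 17, 17, 17, 10, 4],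
--     'W': [17, 17, 17, 21, 27, 17, 17],
--     'X': [17, 17, 10, 4, 10, 17, 17],
--     'Y': [17, 17, 10, 4, 4, 4, 4],
--     'Z': [31, 1, 2, 4, 8, 16, 31],
--     ' ': [0, 0, 0, 0, 0, 0, 0],
--     '1': [4, 12, 4, 4, 4, 4, 31],
--     '2': [14, 17, 1, 2, 4, 8, 31],
--     '3': [14, 17, 1, 2, 1, 17, 14],
--     '4': [2, 6, 10, 18, 31, 2, 2],
--     '5': [31, 16, 30, 1, 1, 1, 30],
--     '6': [14, 17, 16, 30, 17, 17, 14],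
--     '7': [31, 1, 1, 1, 1, 1, 1],
--     '8': [14, 17, 17, 14, 17, 17, 14],
--     '9': [14, 17, 17, 15, 1, 1, 14],
--     '0': [14, 17, 17, 17, 17, 17, 14],
--     '.': [0, 0, 0, 0, 0, 0, 6],
--     ',': [0, 0, 0, 0, 0, 1, 2],
--     ':': [0, 6, 6, 0, 6, 6, 0],
--     ';': [0, 2, 0, 2, 2, 4, 0],
--     '!': [4, 4, 4, 4, 4, 0, 4],
--     '?': [14, 17, 1, 2, 4, 0, 4],
--     "'": [4, 4, 8, 0, 0, 0, 0],
--     '"': [20, 20, 0, 0, 0, 0, 0],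
--     '-': [0, 0, 0, 31, 0, 0, 0],
--     '+': [0, 2, 2, 31, 2, 2, 0],
--     '*': [0, 17, 4, 31, 4, 17, 0],
--     '/': [1, 2, 4, 8, 16, 0, 0],
--     '\\': [16, 8, 4, 2, 1, 0, 0],
--     '=': [0, 31, 0, 31, 0, 0, 0],
--     '_': [0, 0, 0, 0, 0, 0, 31],
--     '<': [1, 2, 4, 16, 4, 2, 1],
--     '>': [16, 4, 2, 1, 2, 4, 16],
--     '[': [6, 4, 4, 4, 4, 4, 6],
--     ']': [12, 2, 2, 2, 2, 2, 12],
--     '(': [2, 4, 8, 16, 8, 4, 2],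
--     ')': [8, 4, 2, 1, 2, 4, 8],
--     '{': [2, 4, 4, 16, 4, 4, 2],
--     '}': [4, 2, 2, 1, 2, 2, 4],
--     '#': [5, 15, 5, 15, 5, 15, 5],
--     '$': [4, 15, 20, 14, 5, 31, 4],
--     '%': [17, 18, 2, 4, 8, 18, 17],
--     '@': [14, 17, 23, 21, 23, 16, 14],
--     '^': [4, 10, 17, 0, 0, 0, 0],
--     '`': [4, 2, 1, 0, 0, 0, 0],
--     '~': [12, 18, 0, 0, 0, 0, 0],
--     '°': [6, 9, 9, 6, 0, 0, 0],
--     '£': [4, 15, 4, 15, 4, 15, 4],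
--     '¥': [17, 10, 4, 31, 4, 4, 4],
--     '€': [14, 16, 31, 16, 31, 16, 14],
--     '¢': [4, 15, 16, 16, 16, 15, 4],}
--
--
-- _SLABS = [
--     "".join("#" if v // 2 ** (4 - c) % 2 else " " for c in range(5))
--     for v in range(32)
-- ]
--
--
-- def generate_word_matrix(word: str) -> List[List[str]]:
--     word = word.upper()
--     return [
--         list(" ".join(_SLABS[FONT_BITS.get(ch, [0] * 7)[r]] for ch in word))
--         for r in range(7)
--     ]
-- ===== Notes on version B (the rewrite author's own statement) =====
-- stated objective: alternative
-- what changed: Replaces A's string-glyph table plus preallocated 7x(6n-1) blank matrix filled cell-by-cell through a current_col cursor with a compact 5-bit-per-row integer font and a precomputed table of the 32 possible 5-character slabs: each row is assembled by indexing the slab table with each letter's row bitmask and joining with a single-space separator, the inter-letter blank column emerging from join instead of +6/+5 cursor arithmetic.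
import Mathlib
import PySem

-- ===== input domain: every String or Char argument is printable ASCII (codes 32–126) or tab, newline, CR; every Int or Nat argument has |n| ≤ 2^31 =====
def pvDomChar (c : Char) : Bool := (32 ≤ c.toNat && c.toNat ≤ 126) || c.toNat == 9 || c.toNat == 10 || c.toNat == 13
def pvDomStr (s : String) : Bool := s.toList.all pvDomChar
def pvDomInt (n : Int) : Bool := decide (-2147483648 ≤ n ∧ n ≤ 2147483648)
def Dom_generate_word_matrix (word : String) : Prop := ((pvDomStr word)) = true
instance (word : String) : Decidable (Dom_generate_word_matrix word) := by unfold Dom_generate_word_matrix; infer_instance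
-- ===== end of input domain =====

-- B replaces A's string-glyph table and preallocated 7×(6n−1) matrix filled through a current_col
-- cursor by a compact 5-bit-per-row integer font decoded row by row and joined with one blank
-- column; objective: alternative (different font representation and row assembly).

-- ===== PORT A =====
def LETTER_MAP : PySem.Dict Char (List String) := PySem.Dict.mk [
  ('A', ["  #   ", " # #  ", "#   # ", "##### ", "#   # ", "#   # ", "#   # "]),
  ('B', ["####  ", "#   # ", "#   # ", "####  ", "#   # ", "#   # ", "####  "]),
  ('C', [" ###  ", "#   # ", "#     ", "#     ", "#     ", "#   # ", " ###  "]),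
  ('D', ["####  ", "#   # ", "#   # ", "#   # ", "#   # ", "#   # ", "####  "]),
  ('E', ["##### ", "#     ", "#     ", "####  ", "#     ", "#     ", "##### "]),
  ('F', ["##### ", "#     ", "#     ", "####  ", "#     ", "#     ", "#     "]),
  ('G', [" ###  ", "#   # ", "#     ", "# ### ", "#   # ", "#   # ", " ###  "]),
  ('H', ["#   # ", "#   # ", "#   # ", "##### ", "#   # ", "#   # ", "#   # "]),
  ('I', ["##### ", "  #   ", "  #   ", "  #   ", "  #   ", "  #   ", "##### "]),
  ('J', [" #### ", "   #  ", "   #  ", "   #  ", "   #  ", "#  #  ", " ##   "]),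
  ('K', ["#   # ", "#  #  ", "# #   ", "##    ", "# #   ", "#  #  ", "#   # "]),
  ('L', ["#     ", "#     ", "#     ", "#     ", "#     ", "#     ", "##### "]),
  ('M', ["#   # ", "#   # ", "## ## ", "# # # ", "#   # ", "#   # ", "#   # "]),
  ('N', ["#   # ", "#   # ", "##  # ", "# # # ", "#  ## ", "#   # ", "#   # "]),
  ('Ñ', [" ## # ", "#  ## ", "# # # ", "# # # ", "# # # ", "#  ## ", " ## # "]),
  ('O', [" ###  ", "#   # ", "#   # ", "#   # ", "#   # ", "#   # ", " ###  "]),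
  ('P', ["####  ", "#   # ", "#   # ", "####  ", "#     ", "#     ", "#     "]),
  ('Q', [" ###  ", "#   # ", "#   # ", "#   # ", "# # # ", "#  #  ", " ## # "]),
  ('R', ["####  ", "#   # ", "#   # ", "####  ", "# #   ", "#  #  ", "#   # "]),
  ('S', [" ###  ", "#   # ", "#     ", " ###  ", "    # ", "#   # ", " ###  "]),
  ('T', ["##### ", "  #   ", "  #   ", "  #   ", "  #   ", "  #   ", "  #   "]),
  ('U', ["#   # ", "#   # ", "#   # ", "#   # ", "#   # ", "#   # ", " ###  "]),
  ('V', ["#   # ", "#   # ", "#   # ", "#   # ", "#   # ", " # #  ", "  #   "]),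
  ('W', ["#   # ", "#   # ", "#   # ", "# # # ", "## ## ", "#   # ", "#   # "]),
  ('X', ["#   # ", "#   # ", " # #  ", "  #   ", " # #  ", "#   # ", "#   # "]),
  ('Y', ["#   # ", "#   # ", " # #  ", "  #   ", "  #   ", "  #   ", "  #   "]),
  ('Z', ["##### ", "    # ", "   #  ", "  #   ", " #    ", "#     ", "##### "]),
  (' ', ["      ", "      ", "      ", "      ", "      ", "      ", "      "]),
  ('1', ["  #   ", " ##   ", "  #   ", "  #   ", "  #   ", "  #   ", "##### "]),
  ('2', [" ###  ", "#   # ", "    # ", "   #  ", "  #   ", " #    ", "##### "]),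
  ('3', [" ###  ", "#   # ", "    # ", "   #  ", "    # ", "#   # ", " ###  "]),
  ('4', ["   #  ", "  ##  ", " # #  ", "#  #  ", "##### ", "   #  ", "   #  "]),
  ('5', ["##### ", "#     ", "####  ", "    # ", "    # ", "    # ", "####  "]),
  ('6', [" ###  ", "#   # ", "#     ", "####  ", "#   # ", "#   # ", " ###  "]),
  ('7', ["##### ", "    # ", "    # ", "    # ", "    # ", "    # ", "    # "]),
  ('8', [" ###  ", "#   # ", "#   # ", " ###  ", "#   # ", "#   # ", " ###  "]),
  ('9', [" ###  ", "#   # ", "#   # ", " #### ", "    # ", "    # ", " ###  "]),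
  ('0', [" ###  ", "#   # ", "#   # ", "#   # ", "#   # ", "#   # ", " ###  "]),
  ('.', ["      ", "      ", "      ", "      ", "      ", "      ", "  ##  "]),
  (',', ["      ", "      ", "      ", "      ", "      ", "    # ", "   #  "]),
  (':', ["      ", "  ##  ", "  ##  ", "      ", "  ##  ", "  ##  ", "      "]),
  (';', ["      ", "   #  ", "      ", "   #  ", "   #  ", "  #   ", "      "]),
  ('!', ["  #   ", "  #   ", "  #   ", "  #   ", "  #   ", "      ", "  #   "]),
  ('?', [" ###  ", "#   # ", "    # ", "   #  ", "  #   ", "      ", "  #   "]),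
  ('\'', ["  #   ", "  #   ", " #    ", "      ", "      ", "      ", "      "]),
  ('\"', ["# #   ", "# #   ", "      ", "      ", "      ", "      ", "      "]),
  ('-', ["      ", "      ", "      ", "##### ", "      ", "      ", "      "]),
  ('+', ["      ", "   #  ", "   #  ", "##### ", "   #  ", "   #  ", "      "]),
  ('*', ["      ", "#   # ", "  #   ", "##### ", "  #   ", "#   # ", "      "]),
  ('/', ["    # ", "   #  ", "  #   ", " #    ", "#     ", "      ", "      "]),
  ('\\', ["#     ", " #    ", "  #   ", "   #  ", "    # ", "      ", "      "]),
  ('=', ["      ", "##### ", "      ", "##### ", "      ", "      ", "      "]),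
  ('_', ["      ", "      ", "      ", "      ", "      ", "      ", "##### "]),
  ('<', ["    # ", "   #  ", "  #   ", "#     ", "  #   ", "   #  ", "    # "]),
  ('>', ["#     ", "  #   ", "   #  ", "    # ", "   #  ", "  #   ", "#     "]),
  ('[', ["  ##  ", "  #   ", "  #   ", "  #   ", "  #   ", "  #   ", "  ##  "]),
  (']', [" ##   ", "   #  ", "   #  ", "   #  ", "   #  ", "   #  ", " ##   "]),
  ('(', ["   #  ", "  #   ", " #    ", "#     ", " #    ", "  #   ", "   #  "]),
  (')', [" #    ", "  #   ", "   #  ", "    # ", "   #  ", "  #   ", " #    "]),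
  ('{', ["   #  ", "  #   ", "  #   ", "#     ", "  #   ", "  #   ", "   #  "]),
  ('}', ["  #   ", "   #  ", "   #  ", "    # ", "   #  ", "   #  ", "  #   "]),
  ('#', ["  # # ", " #####", "  # # ", " #####", "  # # ", " #####", "  # # "]),
  ('$', ["  #   ", " #####", "# #   ", " ###  ", "  # # ", "##### ", "  #   "]),
  ('%', ["#   # ", "#  #  ", "   #  ", "  #   ", " #    ", "#  #  ", "#   # "]),
  ('@', [" ###  ", "#   # ", "# ### ", "# # # ", "# ### ", "#     ", " ### #"]),
  ('^', ["  #   ", " # #  ", "#   # ", "      ", "      ", "      ", "      "]),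
  ('`', ["  #   ", "   #  ", "    # ", "      ", "      ", "      ", "      "]),
  ('~', [" ##   ", "#  #  ", "      ", "      ", "      ", "      ", "      "]),
  ('°', ["  ##  ", " #  # ", " #  # ", "  ##  ", "      ", "      ", "      "]),
  ('£', ["  #   ", " #####", "  #   ", " #####", "  #   ", " #####", "  #   "]),
  ('¥', ["#   # ", " # #  ", "  #   ", "##### ", "  #   ", "  #   ", "  #   "]),
  ('€', [" ###  ", "#     ", "##### ", "#     ", "##### ", "#     ", " ###  "]),
  ('¢', ["  #   ", " #####", "#     ", "#     ", "#     ", " #####", "  #   "])]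

-- A's lookup with default: LETTER_MAP.get(letter, ["     "] * rows)
def pvGlyph (ch : Char) : List String :=
  (PySem.Dict.get? LETTER_MAP ch).getD (List.replicate 7 "     ")

-- final_matrix[r][current_col + c] = letter_pixels[r][c]; indices are always in range when executed
def pvCell (g : List String) (r c : Nat) : String :=
  String.ofList [((g.getD r "").toList.getD c ' ')]

-- the two inner 'for r in range(7): for c in range(5):' loops writing one letter into the matrix
def pvFillLetter (m : List (List String)) (col : Nat) (g : List String) : List (List String) :=
  (List.range 7).foldl (fun m r =>
    (List.range 5).foldl (fun m c =>
      m.set r ((m.getD r []).set (col + c) (pvCell g r c))) m) m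

def generate_word_matrix (word : String) : List (List String) :=
  let w : List Char := (PySem.Str.upper word).toList
  let totalColumns : Int := (w.length : Int) * 6 - 1
  let init : List (List String) :=
    (List.range 7).map (fun _ => (PySem.List.pyRange 0 totalColumns 1).map (fun _ => " "))
  (((PySem.List.enumerate w).foldl
      (fun (st : List (List String) × Nat) p =>
        (pvFillLetter st.1 st.2 (pvGlyph p.2),
         st.2 + (if p.1 < (w.length : Int) - 1 then 6 else 5)))
      (init, 0))).1

-- ===== PORT B =====
-- Source B's FONT_BITS: each glyph is 7 ints, bit (4-c) of row r lit iff column c of row r is '#'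
def FONT_BITS : PySem.Dict Char (List Int) := PySem.Dict.mk [
  ('A', ([4, 10, 17, 31, 17, 17, 17] : List Int)),
  ('B', ([30, 17, 17, 30, 17, 17, 30] : List Int)),
  ('C', ([14, 17, 16, 16, 16, 17, 14] : List Int)),
  ('D', ([30, 17, 17, 17, 17, 17, 30] : List Int)),
  ('E', ([31, 16, 16, 30, 16, 16, 31] : List Int)),
  ('F', ([31, 16, 16, 30, 16, 16, 16] : List Int)),
  ('G', ([14, 17, 16, 23, 17, 17, 14] : List Int)),
  ('H', ([17, 17, 17, 31, 17, 17, 17] : List Int)),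
  ('I', ([31, 4, 4, 4, 4, 4, 31] : List Int)),
  ('J', ([15, 2, 2, 2, 2, 18, 12] : List Int)),
  ('K', ([17, 18, 20, 24, 20, 18, 17] : List Int)),
  ('L', ([16, 16, 16, 16, 16, 16, 31] : List Int)),
  ('M', ([17, 17, 27, 21, 17, 17, 17] : List Int)),
  ('N', ([17, 17, 25, 21, 19, 17, 17] : List Int)),
  ('Ñ', ([13, 19, 21, 21, 21, 19, 13] : List Int)),
  ('O', ([14, 17, 17, 17, 17, 17, 14] : List Int)),
  ('P', ([30, 17, 17, 30, 16, 16, 16] : List Int)),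
  ('Q', ([14, 17, 17, 17, 21, 18, 13] : List Int)),
  ('R', ([30, 17, 17, 30, 20, 18, 17] : List Int)),
  ('S', ([14, 17, 16, 14, 1, 17, 14] : List Int)),
  ('T', ([31, 4, 4, 4, 4, 4, 4] : List Int)),
  ('U', ([17, 17, 17, 17, 17, 17, 14] : List Int)),
  ('V', ([17, 17, 17, 17, 17, 10, 4] : List Int)),
  ('W', ([17, 17, 17, 21, 27, 17, 17] : List Int)),
  ('X', ([17, 17, 10, 4, 10, 17, 17] : List Int)),
  ('Y', ([17, 17, 10, 4, 4, 4, 4] : List Int)),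
  ('Z', ([31, 1, 2, 4, 8, 16, 31] : List Int)),
  (' ', ([0, 0, 0, 0, 0, 0, 0] : List Int)),
  ('1', ([4, 12, 4, 4, 4, 4, 31] : List Int)),
  ('2', ([14, 17, 1, 2, 4, 8, 31] : List Int)),
  ('3', ([14, 17, 1, 2, 1, 17, 14] : List Int)),
  ('4', ([2, 6, 10, 18, 31, 2, 2] : List Int)),
  ('5', ([31, 16, 30, 1, 1, 1, 30] : List Int)),
  ('6', ([14, 17, 16, 30, 17, 17, 14] : List Int)),
  ('7', ([31, 1, 1, 1, 1, 1, 1] : List Int)),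
  ('8', ([14, 17, 17, 14, 17, 17, 14] : List Int)),
  ('9', ([14, 17, 17, 15, 1, 1, 14] : List Int)),
  ('0', ([14, 17, 17, 17, 17, 17, 14] : List Int)),
  ('.', ([0, 0, 0, 0, 0, 0, 6] : List Int)),
  (',', ([0, 0, 0, 0, 0, 1, 2] : List Int)),
  (':', ([0, 6, 6, 0, 6, 6, 0] : List Int)),
  (';', ([0, 2, 0, 2, 2, 4, 0] : List Int)),
  ('!', ([4, 4, 4, 4, 4, 0, 4] : List Int)),
  ('?', ([14, 17, 1, 2, 4, 0, 4] : List Int)),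
  ('\'', ([4, 4, 8, 0, 0, 0, 0] : List Int)),
  ('\"', ([20, 20, 0, 0, 0, 0, 0] : List Int)),
  ('-', ([0, 0, 0, 31, 0, 0, 0] : List Int)),
  ('+', ([0, 2, 2, 31, 2, 2, 0] : List Int)),
  ('*', ([0, 17, 4, 31, 4, 17, 0] : List Int)),
  ('/', ([1, 2, 4, 8, 16, 0, 0] : List Int)),
  ('\\', ([16, 8, 4, 2, 1, 0, 0] : List Int)),
  ('=', ([0, 31, 0, 31, 0, 0, 0] : List Int)),
  ('_', ([0, 0, 0, 0, 0, 0, 31] : List Int)),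
  ('<', ([1, 2, 4, 16, 4, 2, 1] : List Int)),
  ('>', ([16, 4, 2, 1, 2, 4, 16] : List Int)),
  ('[', ([6, 4, 4, 4, 4, 4, 6] : List Int)),
  (']', ([12, 2, 2, 2, 2, 2, 12] : List Int)),
  ('(', ([2, 4, 8, 16, 8, 4, 2] : List Int)),
  (')', ([8, 4, 2, 1, 2, 4, 8] : List Int)),
  ('{', ([2, 4, 4, 16, 4, 4, 2] : List Int)),
  ('}', ([4, 2, 2, 1, 2, 2, 4] : List Int)),
  ('#', ([5, 15, 5, 15, 5, 15, 5] : List Int)),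
  ('$', ([4, 15, 20, 14, 5, 31, 4] : List Int)),
  ('%', ([17, 18, 2, 4, 8, 18, 17] : List Int)),
  ('@', ([14, 17, 23, 21, 23, 16, 14] : List Int)),
  ('^', ([4, 10, 17, 0, 0, 0, 0] : List Int)),
  ('`', ([4, 2, 1, 0, 0, 0, 0] : List Int)),
  ('~', ([12, 18, 0, 0, 0, 0, 0] : List Int)),
  ('°', ([6, 9, 9, 6, 0, 0, 0] : List Int)),
  ('£', ([4, 15, 4, 15, 4, 15, 4] : List Int)),
  ('¥', ([17, 10, 4, 31, 4, 4, 4] : List Int)),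
  ('€', ([14, 16, 31, 16, 31, 16, 14] : List Int)),
  ('¢', ([4, 15, 16, 16, 16, 15, 4] : List Int))]

-- _SLABS: the 32 possible 5-column slabs, decoded once from the bit patterns
def pvSlabs : List String :=
  (PySem.List.pyRange 0 32 1).map (fun v =>
    String.ofList ((List.range 5).map (fun c =>
      if PySem.Int.mod (PySem.Int.floordiv v ((2 : Int) ^ (4 - c))) 2 ≠ 0 then '#' else ' ')))

def generate_word_matrix_alt (word : String) : List (List String) :=
  let w : List Char := (PySem.Str.upper word).toList
  (List.range 7).map (fun r =>
    (PySem.Str.join " "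
        (w.map (fun ch =>
          -- _SLABS[...]: the index is a table value, always 0..31 when executed
          (PySem.List.pyGet? pvSlabs
            (((PySem.Dict.get? FONT_BITS ch).getD (List.replicate 7 0)).getD r 0)).getD ""))).toList.map
      (fun c => String.ofList [c]))

-- ===== PRECONDITION & SPEC =====
def Spec_generate_word_matrix (word : String) (out : List (List String)) : Prop := out = generate_word_matrix_alt word
instance (word : String) (out : List (List String)) : Decidable (Spec_generate_word_matrix word out) := by unfold Spec_generate_word_matrix; infer_instance

-- ===== CLAIM (what is proved, stated in full; the proofs are below) =====
def Claim_equal_generate_word_matrix : Prop := ∀ (word : String), Dom_generate_word_matrix word → Spec_generate_word_matrix word (generate_word_matrix word)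

-- ===== LEMMAS AND PROOFS =====

def pvCells (g : List String) (r : Nat) : List String :=
  [pvCell g r 0, pvCell g r 1, pvCell g r 2, pvCell g r 3, pvCell g r 4]
def pvRowFill (row : List String) (col : Nat) (g : List String) (r : Nat) : List String :=
  (List.range 5).foldl (fun row c => row.set (col + c) (pvCell g r c)) row
def pvRowUpd (F : Nat → List String → List String) (m : List (List String)) (r : Nat) : List (List String) :=
  m.set r (F r (m.getD r []))

lemma pvSetFold (r col : Nat) (vc : Nat → String) : ∀ (cs : List Nat) (m : List (List String)), r < m.length →
    cs.foldl (fun m c => m.set r ((m.getD r []).set (col + c) (vc c))) m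
      = m.set r (cs.foldl (fun row c => row.set (col + c) (vc c)) (m.getD r [])) := by
  intro cs
  induction cs with
  | nil =>
      intro m h
      simp [List.getD_eq_getElem?_getD, List.getElem?_eq_getElem h, List.set_getElem_self]
  | cons c cs ih =>
      intro m h
      simp only [List.foldl_cons]
      rw [ih _ (by simpa using h)]
      simp [List.getD_eq_getElem?_getD, h, List.set_set]

lemma pvFoldRowUpd (col : Nat) (g : List String) : ∀ (rs : List Nat) (m : List (List String)),
    (∀ r ∈ rs, r < m.length) →
    rs.foldl (fun m r => (List.range 5).foldl
        (fun m c => m.set r ((m.getD r []).set (col + c) (pvCell g r c))) m) m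
      = rs.foldl (pvRowUpd (fun r row => pvRowFill row col g r)) m := by
  intro rs
  induction rs with
  | nil => intro m _; rfl
  | cons r rs ih =>
      intro m h
      simp only [List.foldl_cons]
      rw [pvSetFold r col _ _ m (h r (by simp))]
      rw [ih]
      · rfl
      · intro r' hr'
        simp only [List.length_set]
        exact h r' (by simp [hr'])

lemma pvRowUpd_length (F : Nat → List String → List String) : ∀ (rs : List Nat) (m : List (List String)),
    (rs.foldl (pvRowUpd F) m).length = m.length := by
  intro rs
  induction rs with
  | nil => intro m; rfl
  | cons r rs ih => intro m; simp [List.foldl_cons, ih, pvRowUpd, List.length_set]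

lemma pvRowUpd_getD (F : Nat → List String → List String) : ∀ (rs : List Nat) (m : List (List String)) (i : Nat),
    rs.Nodup → (∀ r ∈ rs, r < m.length) →
    (rs.foldl (pvRowUpd F) m).getD i [] = if i ∈ rs then F i (m.getD i []) else m.getD i [] := by
  intro rs
  induction rs with
  | nil => intro m i _ _; simp
  | cons r rs ih =>
      intro m i hnd h
      simp only [List.foldl_cons]
      rw [ih _ i hnd.of_cons (by intro r' hr'; simp only [pvRowUpd, List.length_set]; exact h r' (by simp [hr']))]
      by_cases hir : i = r
      · subst hir
        have hi : i ∉ rs := (List.nodup_cons.mp hnd).1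
        simp [hi, pvRowUpd, List.getD_eq_getElem?_getD, h i (by simp)]
      · by_cases hmem : i ∈ rs
        · simp [hmem, hir, pvRowUpd, List.getD_eq_getElem?_getD, Ne.symm hir]
        · simp [hmem, hir, pvRowUpd, List.getD_eq_getElem?_getD, Ne.symm hir]

lemma pvFillLetter_map (f : Nat → List String) (col : Nat) (g : List String) :
    pvFillLetter ((List.range 7).map f) col g
      = (List.range 7).map (fun r => pvRowFill (f r) col g r) := by
  have hlen : ((List.range 7).map f).length = 7 := by simp
  unfold pvFillLetter
  rw [pvFoldRowUpd col g _ _ (by intro r hr; rw [hlen]; simpa using hr)]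
  apply List.ext_getElem
  · simp [pvRowUpd_length]
  · intro i h1 h2
    have hi7 : i < 7 := by simpa using h2
    have := pvRowUpd_getD (fun r row => pvRowFill row col g r) (List.range 7) ((List.range 7).map f) i
      (List.nodup_range) (by intro r hr; rw [hlen]; simpa using hr)
    rw [List.getD_eq_getElem _ _ h1, List.getD_eq_getElem _ _ (by simpa [hlen] using hi7 : i < ((List.range 7).map f).length)] at this
    rw [this]
    simp [hi7]

lemma pvRowFill_append (pre rest : List String) (g : List String) (r : Nat) :
    pvRowFill (pre ++ (" " :: " " :: " " :: " " :: " " :: rest)) pre.length g r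
      = pre ++ (pvCells g r ++ rest) := by
  simp only [pvRowFill, show List.range 5 = [0,1,2,3,4] from rfl, List.foldl_cons, List.foldl_nil]
  simp [pvCells]

def pvLoop6 : List Char → List (List String) → Nat → List (List String)
  | [], m, _ => m
  | ch :: t, m, col => pvLoop6 t (pvFillLetter m col (pvGlyph ch)) (col + 6)
def pvInterRow : List Char → Nat → List String
  | [], _ => []
  | [ch], r => pvCells (pvGlyph ch) r
  | ch :: t, r => pvCells (pvGlyph ch) r ++ " " :: pvInterRow t r

lemma pvLoop6_nil (m : List (List String)) (col : Nat) : pvLoop6 [] m col = m := rfl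
lemma pvLoop6_cons (ch : Char) (t : List Char) (m : List (List String)) (col : Nat) :
    pvLoop6 (ch :: t) m col = pvLoop6 t (pvFillLetter m col (pvGlyph ch)) (col + 6) := rfl

lemma pvInterRow_cons (ch : Char) (t : List Char) (r : Nat) (ht : t ≠ []) :
    pvInterRow (ch :: t) r = pvCells (pvGlyph ch) r ++ " " :: pvInterRow t r := by
  cases t with
  | nil => exact absurd rfl ht
  | cons y ys => rfl

lemma pvLoop6_spec : ∀ (l : List Char) (q : Nat → List String) (p : Nat), l ≠ [] →
    (∀ r, (q r).length = p) →
    pvLoop6 l ((List.range 7).map (fun r => q r ++ List.replicate (6 * l.length - 1) " ")) p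
      = (List.range 7).map (fun r => q r ++ pvInterRow l r) := by
  intro l
  induction l with
  | nil => intro q p h _; exact absurd rfl h
  | cons ch t ih =>
      intro q p _ hq
      cases t with
      | nil =>
          rw [pvLoop6_cons, pvLoop6_nil]
          have : (fun r => q r ++ List.replicate (6 * [ch].length - 1) " ")
               = (fun r => q r ++ (" " :: " " :: " " :: " " :: " " :: [])) := by
            funext r; norm_num [List.replicate]
          rw [this, pvFillLetter_map]
          apply List.map_congr_left
          intro r _
          rw [← hq r, pvRowFill_append]
          simp [pvInterRow]
      | cons y ys =>
          rw [pvLoop6_cons]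
          have hrep : (fun r => q r ++ List.replicate (6 * (ch :: y :: ys).length - 1) " ")
               = (fun r => q r ++ (" " :: " " :: " " :: " " :: " " :: (" " :: List.replicate (6 * (y :: ys).length - 1) " "))) := by
            funext r
            congr 1
          rw [hrep, pvFillLetter_map]
          have hstep : (List.range 7).map (fun r => pvRowFill (q r ++ (" " :: " " :: " " :: " " :: " " :: (" " :: List.replicate (6 * (y :: ys).length - 1) " "))) p (pvGlyph ch) r)
              = (List.range 7).map (fun r => (q r ++ pvCells (pvGlyph ch) r ++ [" "]) ++ List.replicate (6 * (y :: ys).length - 1) " ") := by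
            apply List.map_congr_left
            intro r _
            rw [← hq r, pvRowFill_append]
            simp
          rw [hstep, ih (fun r => q r ++ pvCells (pvGlyph ch) r ++ [" "]) (p + 6) (by simp) (by
            intro r
            simp [pvCells, ← hq r]
            try omega)]
          apply List.map_congr_left
          intro r _
          rw [pvInterRow_cons ch (y :: ys) r (by simp)]
          simp

lemma pvEnumerate_fold (n : Int) : ∀ (l : List Char) (k : Int) (m : List (List String)) (col : Nat),
    k + l.length = n →
    ((PySem.List.enumerate l k).foldl
        (fun (st : List (List String) × Nat) p =>
          (pvFillLetter st.1 st.2 (pvGlyph p.2),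
           st.2 + (if p.1 < n - 1 then 6 else 5))) (m, col)).1
      = pvLoop6 l m col := by
  intro l
  induction l with
  | nil => intro k m col _; rfl
  | cons ch t ih =>
      intro k m col hk
      rw [PySem.List.enumerate_cons]
      simp only [List.foldl_cons]
      cases t with
      | nil =>
          rw [PySem.List.enumerate_nil]
          simp only [List.foldl_nil]
          rw [pvLoop6_cons, pvLoop6_nil]
      | cons y ys =>
          have hcond : k < n - 1 := by
            simp only [List.length_cons] at hk
            push_cast at hk
            omega
          simp only [hcond, if_pos]
          rw [ih (k + 1) _ _ (by simp only [List.length_cons] at hk ⊢; push_cast at hk ⊢; omega), pvLoop6_cons ch (y :: ys) m col]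

-- the encoding Source B's table is the image of A's table under (MSB-first over the first 5 columns)
def pvEnc (s : String) : Int :=
  (s.toList.take 5).foldl (fun v c => v * 2 + (if c = '#' then 1 else 0)) 0

lemma pv_mk_items {κ ν : Type} [BEq κ] (d : PySem.Dict κ ν) : PySem.Dict.mk d.items = d :=
  PySem.Dict.ext rfl

lemma pv_get?_mk_map {ν ν' : Type} (f : ν → ν') : ∀ (l : List (Char × ν)) (x : Char),
    (PySem.Dict.mk (l.map (fun p => (p.1, f p.2)))).get? x
      = ((PySem.Dict.mk l).get? x).map f := by
  intro l
  induction l with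
  | nil => intro x; simp [PySem.Dict.get?]
  | cons p t ih =>
      intro x
      obtain ⟨k, v⟩ := p
      rw [List.map_cons, PySem.Dict.get?_mk_cons, PySem.Dict.get?_mk_cons]
      by_cases h : (k == x) = true
      · simp [h]
      · simp only [h]
        exact ih x

lemma pvFont_eq : FONT_BITS = PySem.Dict.mk (LETTER_MAP.items.map (fun p => (p.1, p.2.map pvEnc))) := by
  decide

lemma pvFont_get? (ch : Char) :
    PySem.Dict.get? FONT_BITS ch = (PySem.Dict.get? LETTER_MAP ch).map (fun g => g.map pvEnc) := by
  rw [pvFont_eq, pv_get?_mk_map (fun g => g.map pvEnc) LETTER_MAP.items ch, pv_mk_items]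

lemma pvMap_rows : ∀ p ∈ LETTER_MAP.items, p.2.length = 7 ∧
    ∀ s ∈ p.2, (((PySem.List.pyGet? pvSlabs (pvEnc s)).getD "")).toList
      = [s.toList.getD 0 ' ', s.toList.getD 1 ' ', s.toList.getD 2 ' ', s.toList.getD 3 ' ', s.toList.getD 4 ' '] := by
  decide

lemma pvSlab_cells (ch : Char) (r : Nat) (hr : r < 7) :
    (((PySem.List.pyGet? pvSlabs
          (((PySem.Dict.get? FONT_BITS ch).getD (List.replicate 7 0)).getD r 0)).getD "").toList).map
        (fun c => String.ofList [c]) = pvCells (pvGlyph ch) r := by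
  rw [pvFont_get?]
  unfold pvGlyph
  cases h : PySem.Dict.get? LETTER_MAP ch with
  | none =>
      simp only [Option.map_none, Option.getD_none]
      interval_cases r <;> decide
  | some g =>
      obtain ⟨h7, hrows⟩ := pvMap_rows (ch, g) (PySem.Dict.mem_items_of_get?_eq_some _ h)
      simp only at h7 hrows
      simp only [Option.map_some, Option.getD_some]
      have hrlen : r < g.length := by omega
      have hmlen : r < (g.map pvEnc).length := by simpa using hrlen
      rw [List.getD_eq_getElem _ _ hmlen, List.getElem_map,
          hrows _ (List.getElem_mem hrlen)]
      simp [pvCells, pvCell, List.getD_eq_getElem?_getD, List.getElem?_eq_getElem hrlen]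

lemma pvRow_alt (r : Nat) (hr : r < 7) : ∀ (l : List Char),
    ((PySem.Str.join " "
        (l.map (fun ch =>
          (PySem.List.pyGet? pvSlabs
            (((PySem.Dict.get? FONT_BITS ch).getD (List.replicate 7 0)).getD r 0)).getD ""))).toList).map
      (fun c => String.ofList [c]) = pvInterRow l r := by
  intro l
  induction l with
  | nil => simp [PySem.Str.toList_join, PySem.Chars.join_nil, pvInterRow]
  | cons ch t ih =>
      cases t with
      | nil =>
          simp only [List.map_cons, List.map_nil]
          rw [PySem.Str.toList_join]
          simp only [List.map_cons, List.map_nil, PySem.Chars.join_singleton]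
          rw [pvSlab_cells ch r hr]
          rfl
      | cons y ys =>
          rw [pvInterRow_cons ch (y :: ys) r (by simp)]
          simp only [List.map_cons]
          rw [PySem.Str.toList_join] at ih ⊢
          simp only [List.map_cons, PySem.Chars.join_cons_cons]
          rw [List.map_append, List.map_append, pvSlab_cells ch r hr]
          simp only [List.map_cons] at ih
          rw [ih]
          show _ ++ (" ".toList.map fun c => String.ofList [c]) ++ _ = _
          have hsp : (" ".toList.map fun c => String.ofList [c]) = [" "] := by decide
          rw [hsp]
          simp

lemma pvInit_row (len : Nat) (hlen : 1 ≤ len) :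
    (PySem.List.pyRange 0 ((len : Int) * 6 - 1) 1).map (fun _ => " ")
      = List.replicate (6 * len - 1) " " := by
  rw [PySem.List.pyRange_one, List.map_map]
  simp only [Function.comp_def]
  rw [List.map_const']
  congr 1
  simp only [List.length_range]
  omega

-- ===== VERDICT (by name: the statement is the Claim_ definition above) =====
theorem generate_word_matrix_spec : Claim_equal_generate_word_matrix := by
  intro word _
  unfold Spec_generate_word_matrix generate_word_matrix generate_word_matrix_alt
  simp only []
  by_cases hw : (PySem.Str.upper word).toList = []
  · rw [hw]
    simp only [List.length_nil, List.map_nil]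
    rw [PySem.List.enumerate_nil]
    simp only [List.foldl_nil]
    rw [show ((0 : Nat) : Int) * 6 - 1 = -1 by norm_num,
        PySem.List.pyRange_one_eq_nil (by norm_num)]
    simp [PySem.Str.toList_join, PySem.Chars.join_nil]
  · rw [pvEnumerate_fold (((PySem.Str.upper word).toList.length : Int)) _ 0 _ 0 (by simp)]
    rw [pvInit_row _ (List.length_pos_iff.mpr hw)]
    have hinit : (List.range 7).map (fun _ => List.replicate (6 * (PySem.Str.upper word).toList.length - 1) " ")
        = (List.range 7).map (fun r => (fun _ : Nat => ([] : List String)) r ++ List.replicate (6 * (PySem.Str.upper word).toList.length - 1) " ") := by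
      simp
    rw [hinit, pvLoop6_spec _ _ 0 hw (fun r => rfl)]
    apply List.map_congr_left
    intro r hrr
    have hr : r < 7 := by simpa using hrr
    rw [pvRow_alt r hr]
    simp
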